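-- pv_equiv track=rewrite | github.com/RovaFananganana/NAS | utils/nas_utils.py | is_safe_path
-- ===== SOURCE A (Python) =====
-- def is_safe_path(path: str, base: str = "/") -> bool:
--     """
--     Vérifie que le chemin donné est à l'intérieur du chemin de base
--     Adapté pour les chemins SMB
--     """
--     # Normaliser les chemins pour SMB (utiliser /)
--     normalized_path = normalize_smb_path(path)
--     normalized_base = normalize_smb_path(base)
--
--     # Vérifier que le chemin ne contient pas de séquences dangereuses
--     dangerous_sequences = ['../', '..\\', '/../', '\\..\\']
--     for seq in dangerous_sequences:
--         if seq in normalized_path: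
--             return False
--
--     # Le chemin doit commencer par la base ou être égal
--     return normalized_path.startswith(normalized_base)
--
-- def normalize_smb_path(path: str) -> str:
--     """
--     Normalise un chemin pour SMB (remplace \ par /, supprime doubles /)
--     """
--     if not path:
--         return "/"
--
--     # Remplacer \ par /
--     normalized = path.replace("\\", "/")
--
--     # Assurer que ça commence par /
--     if not normalized.startswith("/"):
--         normalized = "/" + normalized
--
--     # Supprimer les doubles /
--     while "//" in normalized:
--         normalized = normalized.replace("//", "/")
--
--     # Supprimer le / final sauf pour la racine
--     if len(normalized) > 1 and normalized.endswith("/"):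
--         normalized = normalized[:-1]
--
--     return normalized
-- ===== SOURCE B (Python) =====
-- def is_safe_path(path: str, base: str = "/") -> bool:
--     normalized_path = _normalize(path)
--     normalized_base = _normalize(base)
--     if any(seq in normalized_path for seq in ('../', '..\\', '/../', '\\..\\')):
--         return False
--     return normalized_path.startswith(normalized_base)
--
--
-- def _normalize(p: str) -> str:
--     # single left-to-right scan: map '\' to '/', skip a '/' that would double,
--     # always rooted at '/'
--     out = ['/']
--     for ch in p:
--         if ch == '\\':
--             ch = '/'
--         if ch == '/' and out[-1] == '/':
--             continue
--         out.append(ch)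
--     if len(out) > 1 and out[-1] == '/':
--         out.pop()
--     return ''.join(out)
-- ===== Notes on version B (the rewrite author's own statement) =====
-- stated objective: alternative
-- what changed: Normalization is rebuilt as a single left-to-right scan that maps backslashes to forward slashes and skips any slash that would double the previous one, replacing the while loop of repeated global double-slash replace passes in A.
import Mathlib
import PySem

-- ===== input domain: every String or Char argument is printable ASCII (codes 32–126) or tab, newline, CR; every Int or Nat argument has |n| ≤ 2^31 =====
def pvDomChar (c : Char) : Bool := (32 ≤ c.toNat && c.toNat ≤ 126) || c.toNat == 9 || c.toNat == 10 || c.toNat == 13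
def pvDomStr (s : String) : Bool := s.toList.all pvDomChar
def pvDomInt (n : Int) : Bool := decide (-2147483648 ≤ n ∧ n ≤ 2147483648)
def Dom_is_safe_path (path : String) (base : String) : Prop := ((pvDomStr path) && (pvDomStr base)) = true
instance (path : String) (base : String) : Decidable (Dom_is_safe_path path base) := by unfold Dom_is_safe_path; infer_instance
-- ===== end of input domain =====

-- B normalizes with a single left-to-right scan instead of A's repeated global
-- "//"->"/" replace passes (objective: alternative single-pass decomposition).

-- ===== PORT A =====

-- one pass of Python's  s.replace("//", "/")  (left-to-right, non-overlapping); this and the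
-- three lemmas after it only justify termination of the while-loop port pvCollapseA below
def pvSq1 : List Char → List Char
  | [] => []
  | [c] => [c]
  | a :: b :: t => if a = '/' ∧ b = '/' then '/' :: pvSq1 t else a :: pvSq1 (b :: t)

theorem pvReplaceGo_ss (fuel : Nat) : ∀ (l acc : List Char), l.length ≤ fuel →
    PySem.Chars.replace.go ['/', '/'] ['/'] fuel l acc = acc.reverse ++ pvSq1 l := by
  induction fuel with
  | zero =>
    intro l acc h
    have : l = [] := List.eq_nil_of_length_eq_zero (Nat.le_zero.mp h)
    subst this; simp [PySem.Chars.replace.go, pvSq1]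
  | succ n ih =>
    intro l acc h
    match l with
    | [] => simp [PySem.Chars.replace.go, pvSq1]
    | c :: t =>
      rw [PySem.Chars.replace.go]
      by_cases hp : List.isPrefixOf ['/', '/'] (c :: t)
      · obtain ⟨u, hu⟩ := List.isPrefixOf_iff_prefix.mp hp
        simp only [List.cons_append, List.nil_append] at hu
        obtain ⟨rfl, hu2⟩ := List.cons.inj hu
        subst hu2
        simp only [hp, if_pos]
        rw [show List.drop (['/', '/'] : List Char).length ('/' :: '/' :: u) = u by simp,
            show (['/'] : List Char).reverse ++ acc = '/' :: acc by simp,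
            ih u ('/' :: acc) (by simp at h ⊢; omega)]
        simp [pvSq1]
      · simp only [hp, if_neg, Bool.false_eq_true, not_false_iff]
        rw [ih t (c :: acc) (by simp at h ⊢; omega)]
        have hcc : ∀ u, ¬ (c = '/' ∧ t = '/' :: u) := by
          rintro u ⟨rfl, rfl⟩
          exact hp (by simp [List.isPrefixOf_iff_prefix])
        match t with
        | [] => simp [pvSq1]
        | d :: u =>
          have : ¬ (c = '/' ∧ d = '/') := fun ⟨h1, h2⟩ => hcc u ⟨h1, by rw [h2]⟩
          simp [pvSq1, this]

theorem pvReplace_ss (l : List Char) :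
    PySem.Chars.replace l ['/', '/'] ['/'] = pvSq1 l := by
  have := pvReplaceGo_ss l.length l [] le_rfl
  simpa [PySem.Chars.replace] using this

theorem pvSq1_le (l : List Char) : (pvSq1 l).length ≤ l.length := by
  induction l using pvSq1.induct with
  | case1 => simp [pvSq1]
  | case2 c => simp [pvSq1]
  | case3 a b t h ih =>
    obtain ⟨rfl, rfl⟩ := h
    simp only [pvSq1]
    simp; omega
  | case4 a b t h ih =>
    simp only [pvSq1, if_neg h]
    simp at ih ⊢; omega

theorem pvSq1_lt (l : List Char) (h : ['/', '/'] <:+: l) :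
    (pvSq1 l).length < l.length := by
  induction l using pvSq1.induct with
  | case1 => simp at h
  | case2 c =>
    obtain ⟨s, t, hst⟩ := h
    apply_fun List.length at hst
    simp at hst; omega
  | case3 a b t hab ih =>
    obtain ⟨rfl, rfl⟩ := hab
    have := pvSq1_le t
    simp only [pvSq1]
    simp; omega
  | case4 a b t hab ih =>
    have h' : ['/', '/'] <:+: b :: t := by
      rcases List.infix_cons_iff.mp h with hpre | hinf
      · rcases List.cons_prefix_cons.mp hpre with ⟨rfl, hpre2⟩
        rcases List.cons_prefix_cons.mp hpre2 with ⟨rfl, _⟩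
        exact absurd ⟨rfl, rfl⟩ hab
      · exact hinf
    have := ih h'
    simp only [pvSq1, if_neg hab]
    simp at this ⊢; omega

-- the  while "//" in normalized: normalized = normalized.replace("//", "/")  loop
def pvCollapseA (cs : List Char) : List Char :=
  if h : PySem.Chars.isIn ['/', '/'] cs = true then
    pvCollapseA (PySem.Chars.replace cs ['/', '/'] ['/'])
  else cs
termination_by cs.length
decreasing_by
  rw [pvReplace_ss]
  exact pvSq1_lt cs ((PySem.Chars.isIn_iff_infix _ _).mp h)

-- port of normalize_smb_path
def pvNormalizeA (p : List Char) : List Char :=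
  if p = [] then ['/']
  else
    let n1 := PySem.Chars.replace p ['\\'] ['/']
    let n2 := if PySem.Chars.startswith n1 ['/'] = true then n1 else '/' :: n1
    let n3 := pvCollapseA n2
    if 1 < n3.length ∧ PySem.Chars.endswith n3 ['/'] = true then
      PySem.List.slice n3 none (some (-1))
    else n3

-- the  for seq in dangerous_sequences: if seq in normalized_path: return False  loop
def pvDangerA : List (List Char) → List Char → Bool
  | [], _ => false
  | s :: rest, np => if PySem.Chars.isIn s np = true then true else pvDangerA rest np

def is_safe_path (path : String) (base : String) : Bool :=
  let np := pvNormalizeA path.toList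
  let nb := pvNormalizeA base.toList
  if pvDangerA [['.', '.', '/'], ['.', '.', '\\'], ['/', '.', '.', '/'], ['\\', '.', '.', '\\']] np
  then false
  else PySem.Chars.startswith np nb

-- ===== PORT B =====

-- body of B's scan loop: map '\' to '/', skip a '/' that would double
def pvStepB (out : List Char) (ch : Char) : List Char :=
  let ch' := if ch = '\\' then '/' else ch
  if ch' = '/' ∧ out.getLast? = some '/' then out else out ++ [ch']

-- port of B's _normalize
def pvNormalizeB (p : List Char) : List Char :=
  let out := p.foldl pvStepB ['/']
  if 1 < out.length ∧ out.getLast? = some '/' then out.dropLast else out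

def is_safe_path_alt (path : String) (base : String) : Bool :=
  let np := pvNormalizeB path.toList
  let nb := pvNormalizeB base.toList
  if [['.', '.', '/'], ['.', '.', '\\'], ['/', '.', '.', '/'], ['\\', '.', '.', '\\']].any
      (fun s => PySem.Chars.isIn s np)
  then false
  else PySem.Chars.startswith np nb

-- ===== PRECONDITION & SPEC =====
def Spec_is_safe_path (path : String) (base : String) (out : Bool) : Prop := out = is_safe_path_alt path base
instance (path : String) (base : String) (out : Bool) : Decidable (Spec_is_safe_path path base out) := by unfold Spec_is_safe_path; infer_instance

-- ===== CLAIM (what is proved, stated in full; the proofs are below) =====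
def Claim_equal_is_safe_path : Prop := ∀ (path : String) (base : String), Dom_is_safe_path path base → Spec_is_safe_path path base (is_safe_path path base)

-- ===== LEMMAS AND PROOFS =====

-- canonical slash-collapse both normalizations compute
def pvSqueeze : List Char → List Char
  | [] => []
  | [c] => [c]
  | a :: b :: t => if a = '/' ∧ b = '/' then pvSqueeze (b :: t) else a :: pvSqueeze (b :: t)

def pvMapBS (p : List Char) : List Char := p.map (fun c => if c = '\\' then '/' else c)

theorem pvReplaceGo_bs (fuel : Nat) : ∀ (l acc : List Char), l.length ≤ fuel →
    PySem.Chars.replace.go ['\\'] ['/'] fuel l acc = acc.reverse ++ pvMapBS l := by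
  induction fuel with
  | zero =>
    intro l acc h
    have : l = [] := List.eq_nil_of_length_eq_zero (Nat.le_zero.mp h)
    subst this; simp [PySem.Chars.replace.go, pvMapBS]
  | succ n ih =>
    intro l acc h
    match l with
    | [] => simp [PySem.Chars.replace.go, pvMapBS]
    | c :: t =>
      rw [PySem.Chars.replace.go]
      by_cases hp : List.isPrefixOf ['\\'] (c :: t)
      · obtain ⟨u, hu⟩ := List.isPrefixOf_iff_prefix.mp hp
        simp only [List.cons_append, List.nil_append] at hu
        obtain ⟨rfl, hu2⟩ := List.cons.inj hu
        subst hu2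
        simp only [hp, if_pos]
        rw [show List.drop (['\\'] : List Char).length ('\\' :: u) = u by simp,
            show (['/'] : List Char).reverse ++ acc = '/' :: acc by simp,
            ih u ('/' :: acc) (by simp at h ⊢; omega)]
        simp [pvMapBS]
      · have hc : c ≠ '\\' := by
          intro hc; subst hc
          exact hp (by simp [List.isPrefixOf_iff_prefix])
        simp only [hp, if_neg, Bool.false_eq_true, not_false_iff]
        rw [ih t (c :: acc) (by simp at h ⊢; omega)]
        simp [pvMapBS, hc]

theorem pvReplace_bs (l : List Char) :
    PySem.Chars.replace l ['\\'] ['/'] = pvMapBS l := by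
  have := pvReplaceGo_bs l.length l [] le_rfl
  simpa [PySem.Chars.replace] using this

theorem pvSqueeze_eq_self (l : List Char) (h : ¬ ['/', '/'] <:+: l) : pvSqueeze l = l := by
  induction l using pvSqueeze.induct with
  | case1 => simp [pvSqueeze]
  | case2 c => simp [pvSqueeze]
  | case3 a b t hab ih =>
    obtain ⟨rfl, rfl⟩ := hab
    exact absurd (List.infix_cons_iff.mpr (.inl (by simp [List.cons_prefix_cons]))) h
  | case4 a b t hab ih =>
    have h' : ¬ ['/', '/'] <:+: b :: t := fun hi =>
      h (List.infix_cons_iff.mpr (.inr hi))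
    simp only [pvSqueeze, if_neg hab]
    rw [ih h']

theorem pvSqueeze_cons_cons (c : Char) (t : List Char) :
    pvSqueeze ('/' :: '/' :: t) = pvSqueeze ('/' :: t) := by
  simp [pvSqueeze]

theorem pvSqueeze_cons_ne (c d : Char) (t : List Char) (h : ¬ (c = '/' ∧ d = '/')) :
    pvSqueeze (c :: d :: t) = c :: pvSqueeze (d :: t) := by
  simp only [pvSqueeze, if_neg h]

theorem pvSqueeze_cons_sq1 (t : List Char) : ∀ (c : Char),
    pvSqueeze (c :: pvSq1 t) = pvSqueeze (c :: t) := by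
  induction t using pvSq1.induct with
  | case1 => intro c; simp [pvSq1]
  | case2 d => intro c; simp [pvSq1]
  | case3 a b u hab ih =>
    intro c
    obtain ⟨rfl, rfl⟩ := hab
    rw [show pvSq1 ('/' :: '/' :: u) = '/' :: pvSq1 u from by simp [pvSq1]]
    by_cases hc : c = '/'
    · subst hc
      rw [pvSqueeze_cons_cons '/' (pvSq1 u), pvSqueeze_cons_cons '/' ('/' :: u),
          pvSqueeze_cons_cons '/' u]
      exact ih '/'
    · have h1 : ¬ (c = '/' ∧ ('/' : Char) = '/') := fun h => hc h.1
      rw [pvSqueeze_cons_ne c '/' (pvSq1 u) h1, pvSqueeze_cons_ne c '/' ('/' :: u) h1,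
          pvSqueeze_cons_cons '/' u]
      rw [ih '/']
  | case4 a b u hab ih =>
    intro c
    simp only [pvSq1, if_neg hab]
    by_cases hc : c = '/' ∧ a = '/'
    · obtain ⟨rfl, rfl⟩ := hc
      rw [pvSqueeze_cons_cons '/' (pvSq1 (b :: u)), pvSqueeze_cons_cons '/' (b :: u)]
      exact ih '/'
    · rw [pvSqueeze_cons_ne c a (pvSq1 (b :: u)) hc, pvSqueeze_cons_ne c a (b :: u) hc, ih a]

theorem pvSqueeze_sq1 (l : List Char) : pvSqueeze (pvSq1 l) = pvSqueeze l := by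
  match l with
  | [] => rfl
  | [c] => rfl
  | a :: b :: t =>
    by_cases hab : a = '/' ∧ b = '/'
    · obtain ⟨rfl, rfl⟩ := hab
      rw [show pvSq1 ('/' :: '/' :: t) = '/' :: pvSq1 t from by simp [pvSq1],
          pvSqueeze_cons_sq1 t '/', pvSqueeze_cons_cons '/' t]
    · simp only [pvSq1, if_neg hab]
      exact pvSqueeze_cons_sq1 (b :: t) a

theorem pvCollapseA_eq (cs : List Char) : pvCollapseA cs = pvSqueeze cs := by
  induction cs using pvCollapseA.induct with
  | case1 cs h ih =>
    rw [pvCollapseA, dif_pos h, ih, pvReplace_ss, pvSqueeze_sq1]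
  | case2 cs h =>
    rw [pvCollapseA, dif_neg h, pvSqueeze_eq_self]
    intro hi
    exact h ((PySem.Chars.isIn_iff_infix _ _).mpr hi)

theorem pvFoldB (l : List Char) : ∀ (out : List Char) (c : Char),
    l.foldl pvStepB (out ++ [c]) = out ++ pvSqueeze (c :: pvMapBS l) := by
  induction l with
  | nil => intro out c; simp [pvSqueeze, pvMapBS]
  | cons ch t ih =>
    intro out c
    have hlast : (out ++ [c]).getLast? = some c := by simp
    by_cases h : (if ch = '\\' then '/' else ch) = '/' ∧ c = '/'
    · have hstep : pvStepB (out ++ [c]) ch = out ++ [c] := by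
        simp only [pvStepB, hlast]
        rw [if_pos ⟨h.1, by rw [h.2]⟩]
      rw [List.foldl_cons, hstep, ih out c]
      have : pvSqueeze (c :: pvMapBS (ch :: t)) = pvSqueeze (c :: pvMapBS t) := by
        simp only [pvMapBS, List.map_cons]
        rw [h.2, h.1]
        exact pvSqueeze_cons_cons '/' _
      rw [this]
    · have hstep : pvStepB (out ++ [c]) ch = (out ++ [c]) ++ [if ch = '\\' then '/' else ch] := by
        simp only [pvStepB, hlast]
        rw [if_neg]
        intro ⟨h1, h2⟩
        exact h ⟨h1, by injection h2⟩
      rw [List.foldl_cons, hstep, ih (out ++ [c]) _]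
      have h' : ¬ (c = '/' ∧ (if ch = '\\' then '/' else ch) = '/') := fun hx => h ⟨hx.2, hx.1⟩
      have : pvSqueeze (c :: pvMapBS (ch :: t)) =
          c :: pvSqueeze ((if ch = '\\' then '/' else ch) :: pvMapBS t) := by
        simp only [pvMapBS, List.map_cons]
        exact pvSqueeze_cons_ne _ _ _ h'
      rw [this, List.append_assoc]
      rfl

theorem pvEndswith_getLast (l : List Char) (c : Char) :
    PySem.Chars.endswith l [c] = true ↔ l.getLast? = some c := by
  rw [PySem.Chars.endswith_iff, List.getLast?_eq_some_iff]
  constructor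
  · rintro ⟨t, rfl⟩; exact ⟨t, rfl⟩
  · rintro ⟨t, rfl⟩; exact ⟨t, rfl⟩

theorem pvSlice_dropLast (l : List Char) :
    PySem.List.slice l none (some (-1)) = l.dropLast := by
  cases l with
  | nil => rfl
  | cons c t =>
    simp [PySem.List.slice, PySem.List.clampIdx, List.dropLast_eq_take]
    split <;> omega

theorem pvNormalize_eq (p : List Char) : pvNormalizeA p = pvNormalizeB p := by
  have hB : pvNormalizeB p =
      (if 1 < (pvSqueeze ('/' :: pvMapBS p)).length ∧
          (pvSqueeze ('/' :: pvMapBS p)).getLast? = some '/'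
       then (pvSqueeze ('/' :: pvMapBS p)).dropLast else pvSqueeze ('/' :: pvMapBS p)) := by
    unfold pvNormalizeB
    rw [show (['/'] : List Char) = [] ++ ['/'] from rfl, pvFoldB p [] '/']
    simp
  rcases eq_or_ne p [] with rfl | hp
  · rw [hB]
    simp [pvNormalizeA, pvSqueeze, pvMapBS]
  · have hA : pvCollapseA (if PySem.Chars.startswith (pvMapBS p) ['/'] = true
        then pvMapBS p else '/' :: pvMapBS p) = pvSqueeze ('/' :: pvMapBS p) := by
      by_cases hs : PySem.Chars.startswith (pvMapBS p) ['/'] = true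
      · rw [if_pos hs, pvCollapseA_eq]
        have hpre : (['/'] : List Char) <+: pvMapBS p := by
          simpa [PySem.Chars.startswith, List.isPrefixOf_iff_prefix] using hs
        obtain ⟨t, ht⟩ := hpre
        simp only [List.cons_append, List.nil_append] at ht
        rw [← ht, pvSqueeze_cons_cons '/' t]
      · rw [if_neg hs, pvCollapseA_eq]
    unfold pvNormalizeA
    rw [if_neg hp, hB]
    simp only [pvReplace_bs, hA]
    rw [pvSlice_dropLast]
    apply if_congr _ rfl rfl
    exact and_congr_right (fun _ => pvEndswith_getLast _ _)

theorem pvDangerA_eq_any (L : List (List Char)) (np : List Char) :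
    pvDangerA L np = L.any (fun s => PySem.Chars.isIn s np) := by
  induction L with
  | nil => rfl
  | cons s rest ih => by_cases h : PySem.Chars.isIn s np = true <;> simp [pvDangerA, h, ih]

-- ===== VERDICT (by name: the statement is the Claim_ definition above) =====
theorem is_safe_path_spec : Claim_equal_is_safe_path := by
  intro path base _
  unfold Spec_is_safe_path is_safe_path is_safe_path_alt
  simp only [pvNormalize_eq, pvDangerA_eq_any]
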